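-- pv_equiv track=rewrite | github.com/wukong930/Zeus | backend/app/api/risk.py | _correlation_unavailable_sections
-- ===== SOURCE A (Python) =====
-- from typing import Any
--
-- CORRELATION_MIN_MARKET_POINTS = 4
--
-- def _correlation_unavailable_sections(
--     symbols: list[str],
--     market_data: dict[str, list[Any]],
-- ) -> list[str]:
--     if not symbols:
--         return []
--
--     sections: list[str] = []
--     if len(symbols) < 2:
--         sections.append("correlation_insufficient_symbols")
--
--     missing = [symbol for symbol in symbols if len(market_data.get(symbol, [])) == 0]
--     insufficient = [
--         symbol
--         for symbol in symbols
--         if 0 < len(market_data.get(symbol, [])) < CORRELATION_MIN_MARKET_POINTS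
--     ]
--     if missing:
--         sections.append(f"correlation_data_missing:{','.join(missing)}")
--     if insufficient:
--         sections.append(f"correlation_data_insufficient:{','.join(insufficient)}")
--     return sections
-- ===== SOURCE B (Python) =====
-- from typing import Any
--
-- CORRELATION_MIN_MARKET_POINTS = 4
--
-- def _correlation_unavailable_sections(
--     symbols: list[str],
--     market_data: dict[str, list[Any]],
-- ) -> list[str]:
--     if not symbols:
--         return []
--
--     # One pass over symbols building the two comma-joined payload strings
--     # directly in optional string accumulators: no intermediate symbol
--     # lists and no join step exist.
--     missing_str: str | None = None
--     insufficient_str: str | None = None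
--     for head in symbols:
--         n = len(market_data.get(head, []))
--         if n == 0:
--             if missing_str is None:
--                 missing_str = head
--             else:
--                 missing_str += "," + head
--         elif n < CORRELATION_MIN_MARKET_POINTS:
--             if insufficient_str is None:
--                 insufficient_str = head
--             else:
--                 insufficient_str += "," + head
--
--     sections: list[str] = []
--     if len(symbols) < 2:
--         sections.append("correlation_insufficient_symbols")
--     if missing_str is not None:
--         sections.append("correlation_data_missing:" + missing_str)
--     if insufficient_str is not None:
--         sections.append("correlation_data_insufficient:" + insufficient_str)
--     return sections
-- ===== Notes on version B (the rewrite author's own statement) =====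
-- stated objective: alternative
-- what changed: Replaces A's two forward filtering comprehensions followed by ','.join with one backwards pass that builds the two comma-joined payload strings directly in Optional[str] accumulators, so no intermediate symbol lists and no join exist.
import Mathlib
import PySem

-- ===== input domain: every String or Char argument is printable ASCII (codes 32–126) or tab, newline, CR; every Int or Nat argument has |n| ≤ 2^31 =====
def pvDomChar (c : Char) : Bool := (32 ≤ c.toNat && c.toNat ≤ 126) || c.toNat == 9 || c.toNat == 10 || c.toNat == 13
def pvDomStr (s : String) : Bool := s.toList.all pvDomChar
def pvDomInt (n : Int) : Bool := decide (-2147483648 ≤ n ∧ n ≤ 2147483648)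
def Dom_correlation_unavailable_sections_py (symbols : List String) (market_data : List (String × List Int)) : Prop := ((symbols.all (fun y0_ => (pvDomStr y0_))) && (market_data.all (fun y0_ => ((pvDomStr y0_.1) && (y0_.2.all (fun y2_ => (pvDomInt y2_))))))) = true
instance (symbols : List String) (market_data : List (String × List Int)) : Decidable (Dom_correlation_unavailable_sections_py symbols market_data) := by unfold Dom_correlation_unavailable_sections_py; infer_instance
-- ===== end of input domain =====

-- B builds the two comma-joined payload strings directly in optional string accumulators
-- during one pass, instead of A's two filtering comprehensions plus ','.join (objective: alternative).

-- ===== PORT A =====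
-- market_data.get(symbol, []) : association-list lookup, first match (dict keys are unique)
def cuGet (market_data : List (String × List Int)) (s : String) : List Int :=
  ((market_data.find? (fun p => p.1 == s)).map Prod.snd).getD []

def correlation_unavailable_sections_py (symbols : List String) (market_data : List (String × List Int)) : List String :=
  if symbols.isEmpty then []
  else
    let sections : List String := []
    let sections := if symbols.length < 2 then sections ++ ["correlation_insufficient_symbols"] else sections
    let missing := symbols.filter (fun s => (cuGet market_data s).length == 0)
    let insufficient := symbols.filter (fun s => decide (0 < (cuGet market_data s).length) && decide ((cuGet market_data s).length < 4))
    let sections := if !missing.isEmpty then sections ++ ["correlation_data_missing:" ++ PySem.Str.join "," missing] else sections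
    let sections := if !insufficient.isEmpty then sections ++ ["correlation_data_insufficient:" ++ PySem.Str.join "," insufficient] else sections
    sections

-- ===== PORT B =====
-- Source B's loop body: extend one optional joined-string accumulator with one symbol
def cuExtend (acc : Option String) (head : String) : String :=
  match acc with
  | none => head
  | some s => s ++ "," ++ head

def correlation_unavailable_sections_py_alt (symbols : List String) (market_data : List (String × List Int)) : List String :=
  if symbols.isEmpty then []
  else
    -- the single pass: both joined strings built directly, no lists, no join
    let acc := symbols.foldl (fun (acc : Option String × Option String) head =>
      let n := (cuGet market_data head).length
      if n == 0 then (some (cuExtend acc.1 head), acc.2)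
      else if n < 4 then (acc.1, some (cuExtend acc.2 head))
      else acc) (none, none)
    let sections : List String := []
    let sections := if symbols.length < 2 then sections ++ ["correlation_insufficient_symbols"] else sections
    let sections := match acc.1 with
      | some ms => sections ++ ["correlation_data_missing:" ++ ms]
      | none => sections
    let sections := match acc.2 with
      | some is => sections ++ ["correlation_data_insufficient:" ++ is]
      | none => sections
    sections

-- ===== PRECONDITION & SPEC =====
def Spec_correlation_unavailable_sections_py (symbols : List String) (market_data : List (String × List Int)) (out : List String) : Prop := out = correlation_unavailable_sections_py_alt symbols market_data
instance (symbols : List String) (market_data : List (String × List Int)) (out : List String) : Decidable (Spec_correlation_unavailable_sections_py symbols market_data out) := by unfold Spec_correlation_unavailable_sections_py; infer_instance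

-- ===== CLAIM (what is proved, stated in full; the proofs are below) =====
def Claim_equal_correlation_unavailable_sections_py : Prop := ∀ (symbols : List String) (market_data : List (String × List Int)), Dom_correlation_unavailable_sections_py symbols market_data → Spec_correlation_unavailable_sections_py symbols market_data (correlation_unavailable_sections_py symbols market_data)

-- ===== LEMMAS AND PROOFS =====

-- folding cuExtend over a list, starting from an optional accumulator
def cuOptJoin (acc : Option String) (l : List String) : Option String :=
  l.foldl (fun a x => some (cuExtend a x)) acc

theorem str_join_singleton (a : String) : PySem.Str.join "," [a] = a := by
  have h : (PySem.Str.join "," [a]).toList = a.toList := by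
    simp [PySem.Chars.join_singleton]
  exact String.toList_inj.mp h

theorem str_join_glue (s x : String) (xs : List String) :
    PySem.Str.join "," ((s ++ "," ++ x) :: xs) = s ++ "," ++ PySem.Str.join "," (x :: xs) := by
  have h : (PySem.Str.join "," ((s ++ "," ++ x) :: xs)).toList
      = (s ++ "," ++ PySem.Str.join "," (x :: xs)).toList := by
    cases xs <;> simp [PySem.Chars.join_singleton, PySem.Chars.join_cons_cons]
  exact String.toList_inj.mp h

theorem str_join_cons_cons (a b : String) (l : List String) :
    PySem.Str.join "," (a :: b :: l) = a ++ "," ++ PySem.Str.join "," (b :: l) := by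
  have h : (PySem.Str.join "," (a :: b :: l)).toList
      = (a ++ "," ++ PySem.Str.join "," (b :: l)).toList := by
    simp [PySem.Chars.join_cons_cons]
  exact String.toList_inj.mp h

theorem cuOptJoin_some (s : String) (l : List String) :
    cuOptJoin (some s) l = some (PySem.Str.join "," (s :: l)) := by
  induction l generalizing s with
  | nil => simp [cuOptJoin, str_join_singleton]
  | cons x xs ih =>
    simp only [cuOptJoin, List.foldl_cons] at ih ⊢
    rw [show (cuExtend (some s) x) = s ++ "," ++ x from rfl, ih, str_join_glue, ← str_join_cons_cons]

theorem cuOptJoin_none (l : List String) :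
    cuOptJoin none l = match l with
      | [] => none
      | _ :: _ => some (PySem.Str.join "," l) := by
  cases l with
  | nil => rfl
  | cons x xs =>
    simp only [cuOptJoin, List.foldl_cons]
    exact cuOptJoin_some x xs

-- the single pass produces the joined strings of A's two filtered lists
theorem cuFold_eq (market_data : List (String × List Int)) (l : List String)
    (m i : Option String) :
    l.foldl (fun (acc : Option String × Option String) head =>
      let n := (cuGet market_data head).length
      if n == 0 then (some (cuExtend acc.1 head), acc.2)
      else if n < 4 then (acc.1, some (cuExtend acc.2 head))
      else acc) (m, i)
    = (cuOptJoin m (l.filter (fun s => (cuGet market_data s).length == 0)),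
       cuOptJoin i (l.filter (fun s => decide (0 < (cuGet market_data s).length) && decide ((cuGet market_data s).length < 4)))) := by
  induction l generalizing m i with
  | nil => simp [cuOptJoin]
  | cons x xs ih =>
    simp only [List.foldl_cons, List.filter_cons]
    by_cases h0 : (cuGet market_data x).length = 0
    · rw [if_pos (by simp [h0]), ih]
      simp [h0, cuOptJoin]
    · by_cases h4 : (cuGet market_data x).length < 4
      · rw [if_neg (by simp [h0]), if_pos h4, ih]
        simp [h0, h4, Nat.pos_of_ne_zero h0, cuOptJoin]
      · rw [if_neg (by simp [h0]), if_neg h4, ih]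
        simp [h0, h4]

-- ===== VERDICT (by name: the statement is the Claim_ definition above) =====
theorem correlation_unavailable_sections_py_spec : Claim_equal_correlation_unavailable_sections_py := by
  intro symbols market_data _
  unfold Spec_correlation_unavailable_sections_py
  unfold correlation_unavailable_sections_py correlation_unavailable_sections_py_alt
  rw [cuFold_eq, cuOptJoin_none, cuOptJoin_none]
  cases hm : symbols.filter (fun s => (cuGet market_data s).length == 0) with
  | nil => cases symbols.filter (fun s => decide (0 < (cuGet market_data s).length) && decide ((cuGet market_data s).length < 4)) <;> simp
  | cons a as => cases symbols.filter (fun s => decide (0 < (cuGet market_data s).length) && decide ((cuGet market_data s).length < 4)) <;> simp
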